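-- pv_equiv track=rewrite | github.com/diiaz2910/test | Parte_1/cadena_matriz.py | cadena_mas_larga
-- ===== SOURCE A (Python) =====
-- def cadena_mas_larga(matriz, fila=0, columna=0):
--     if fila >= len(matriz):
--         #caso base sin coincidencias
--         return ""
--     #condicional final de fila y paso a la siguiente
--     if columna >= len(matriz[fila]):
--         return cadena_mas_larga(matriz,fila +1, 0)
--     #recursividad revisando el siguiente elemento
--     siguiente = cadena_mas_larga(matriz, fila, columna + 1)
--     actual = matriz[fila][columna]
--     #comparacion de la actual con el siguiente
--     if len(actual) >= len(siguiente):
--         return actual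
--     else:
--         return siguiente
-- ===== SOURCE B (Python) =====
-- def cadena_mas_larga(matriz, fila=0, columna=0):
--     best = ""
--     start = columna
--     for row in matriz[fila:]:
--         for elem in row[start:]:
--             if len(elem) > len(best):
--                 best = elem
--         start = 0
--     return best
-- ===== Notes on version B (the rewrite author's own statement) =====
-- stated objective: simpler
-- what changed: Replaces the element-by-element recursion (one Python stack frame per cell, earlier element preferred on ties via >=) by an iterative two-level loop over matriz[fila:] / row[start:] slices with a running best and a strict > comparison.
-- outside the precondition, e.g. on cadena_mas_larga([['zzz', 'a'], ['yyy']], 0, -1): A returns 'zzz', B returns 'yyy'; on cadena_mas_larga([['ab'], ['c']], -5, 0): A raises IndexError, B returns 'ab'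
import Mathlib
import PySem

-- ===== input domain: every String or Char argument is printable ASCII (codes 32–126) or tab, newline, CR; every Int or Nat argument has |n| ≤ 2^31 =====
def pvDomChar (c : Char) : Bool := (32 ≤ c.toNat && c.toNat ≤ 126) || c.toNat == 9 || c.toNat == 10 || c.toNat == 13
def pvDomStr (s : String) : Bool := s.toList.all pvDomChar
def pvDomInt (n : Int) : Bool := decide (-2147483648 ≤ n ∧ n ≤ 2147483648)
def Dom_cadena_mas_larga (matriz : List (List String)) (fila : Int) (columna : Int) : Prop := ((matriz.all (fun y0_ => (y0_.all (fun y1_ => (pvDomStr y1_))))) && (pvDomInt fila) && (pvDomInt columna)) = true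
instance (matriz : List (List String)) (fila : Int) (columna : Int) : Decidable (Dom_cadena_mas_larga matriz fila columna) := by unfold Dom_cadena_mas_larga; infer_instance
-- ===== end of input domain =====

-- B replaces A's per-element recursion by an iterative running-best loop (objective: simpler).

-- ===== PORT A =====
-- Literal port of the recursion; matriz[fila] / row[columna] are PySem.List.pyGetD,
-- exact under Pre_ (both indices non-negative, hence in range wherever they are read).
def cadena_mas_larga (matriz : List (List String)) (fila : Int) (columna : Int) : String :=
  if _h1 : fila ≥ PySem.List.len matriz then ""
  else
    match _hrow : PySem.List.pyGet? matriz fila with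
    | none => ""   -- matriz[fila] raises IndexError in Python (outside Pre_)
    | some row =>
      if _h2 : columna ≥ PySem.List.len row then
        cadena_mas_larga matriz (fila + 1) 0
      else
        match PySem.List.pyGet? row columna with
        | none => ""   -- matriz[fila][columna] raises IndexError in Python (outside Pre_)
        | some actual =>
          let siguiente := cadena_mas_larga matriz fila (columna + 1)
          if PySem.Str.len actual ≥ PySem.Str.len siguiente then actual else siguiente
termination_by (((PySem.List.len matriz) - fila).toNat,
                ((PySem.List.len ((PySem.List.pyGet? matriz fila).getD [])) - columna).toNat)
decreasing_by
  · apply Prod.Lex.left; simp only [PySem.List.len_eq] at *; omega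
  · apply Prod.Lex.right; simp only [_hrow, Option.getD_some, PySem.List.len_eq] at *; omega
-- ===== PORT B =====
-- Literal port of Source B: for row in matriz[fila:]: for elem in row[start:]: … with start reset to 0.
def cadena_mas_larga_alt (matriz : List (List String)) (fila : Int) (columna : Int) : String :=
  ((PySem.List.slice matriz (some fila) none).foldl
    (fun (st : String × Int) row =>
      ((PySem.List.slice row (some st.2) none).foldl
        (fun best elem => if PySem.Str.len elem > PySem.Str.len best then elem else best) st.1, 0))
    ("", columna)).1
-- ===== PRECONDITION & SPEC =====
-- Pre_ excludes negative start indices, on which Python's negative-index wraparound is an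
-- accident of A's recursion-helper parameters (A re-scans wrapped elements of the start row,
-- and raises IndexError once the index is below the wrap range); B's slice semantics on that
-- unspecified corner are equally defensible.
def Pre_cadena_mas_larga (matriz : List (List String)) (fila : Int) (columna : Int) : Prop :=
  0 ≤ fila ∧ 0 ≤ columna
instance (matriz : List (List String)) (fila : Int) (columna : Int) : Decidable (Pre_cadena_mas_larga matriz fila columna) := by unfold Pre_cadena_mas_larga; infer_instance

def pvWitness_cadena_mas_larga : List (List String) × Int × Int := ([["ab"], ["c"]], 0, 0)

def Spec_cadena_mas_larga (matriz : List (List String)) (fila : Int) (columna : Int) (out : String) : Prop := out = cadena_mas_larga_alt matriz fila columna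
instance (matriz : List (List String)) (fila : Int) (columna : Int) (out : String) : Decidable (Spec_cadena_mas_larga matriz fila columna out) := by unfold Spec_cadena_mas_larga; infer_instance

-- ===== CLAIM (what is proved, stated in full; the proofs are below) =====
def Claim_equal_cadena_mas_larga : Prop := ∀ (matriz : List (List String)) (fila : Int) (columna : Int), Dom_cadena_mas_larga matriz fila columna → Pre_cadena_mas_larga matriz fila columna → Spec_cadena_mas_larga matriz fila columna (cadena_mas_larga matriz fila columna)

-- ===== LEMMAS AND PROOFS =====

-- A's fold shape: foldr over the remaining elements, the earlier element winning ties (≥).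
def pickR (l : List String) : String :=
  l.foldr (fun x acc => if PySem.Str.len x ≥ PySem.Str.len acc then x else acc) ""

-- B's fold shape: foldl with a running best, strict >.
def stepL (b x : String) : String := if PySem.Str.len x > PySem.Str.len b then x else b

-- The flat list of elements both programs range over from position (f, c).
def elems (matriz : List (List String)) (f c : Nat) : List String :=
  ((matriz.drop f).headD []).drop c ++ (matriz.drop (f + 1)).flatten

lemma str_len_nonneg (s : String) : 0 ≤ PySem.Str.len s := by
  simp [PySem.Str.len_eq]

lemma str_len_zero {s : String} (h : PySem.Str.len s ≤ 0) : s = "" := by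
  simp [PySem.Str.len_eq] at h
  exact h

-- B's foldl against A's foldr: the running best only changes on a strictly longer element.
lemma pick_lr (l : List String) : ∀ b, l.foldl stepL b =
    if PySem.Str.len b < PySem.Str.len (pickR l) then pickR l else b := by
  induction l with
  | nil =>
    intro b
    have := str_len_nonneg b
    simp [pickR]
    try omega
  | cons x l ih =>
    intro b
    have hp : pickR (x :: l) = if PySem.Str.len x ≥ PySem.Str.len (pickR l) then x else pickR l := rfl
    rw [List.foldl_cons]
    show l.foldl stepL (stepL b x) = _
    rw [ih, hp]
    unfold stepL
    split_ifs <;> first | rfl | omega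

lemma foldl_eq_pickR (l : List String) : l.foldl stepL "" = pickR l := by
  rw [pick_lr]
  have h0 : PySem.Str.len "" = 0 := by decide
  have := str_len_nonneg (pickR l)
  split_ifs with h
  · rfl
  · exact (str_len_zero (by omega)).symm

lemma headD_drop (l : List (List String)) {f : Nat} (h : f < l.length) :
    (l.drop f).headD [] = l[f] := by
  simp [List.head?_drop, h]

lemma flatten_drop_headD (l : List (List String)) (k : Nat) :
    ((l.drop k).headD []) ++ (l.drop (k+1)).flatten = (l.drop k).flatten := by
  have hd : l.drop (k+1) = (l.drop k).drop 1 := by rw [List.drop_drop]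
  rw [hd]; cases h : l.drop k <;> simp

lemma elems_cons (matriz : List (List String)) (f c : Nat)
    (hfl : f < matriz.length) (hcl : c < matriz[f].length) :
    elems matriz f c = matriz[f][c] :: elems matriz f (c + 1) := by
  unfold elems
  rw [headD_drop matriz hfl]
  rw [List.drop_eq_getElem_cons hcl, List.cons_append]

-- A computes pickR of the element list, by A's own recursion.
lemma a_eq_pickR (matriz : List (List String)) : ∀ (fila columna : Int), 0 ≤ fila → 0 ≤ columna →
    cadena_mas_larga matriz fila columna = pickR (elems matriz fila.toNat columna.toNat) := by
  intro fila columna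
  fun_induction cadena_mas_larga matriz fila columna
  case case1 fila columna h1 =>
    intro hf hc
    simp only [PySem.List.len_eq] at h1
    simp only [elems]
    rw [List.drop_eq_nil_of_le (show matriz.length ≤ fila.toNat by omega),
      List.drop_eq_nil_of_le (show matriz.length ≤ fila.toNat + 1 by omega)]
    simp [pickR]
  case case2 fila columna h1 hrow =>
    intro hf hc
    simp only [PySem.List.len_eq] at h1
    rw [PySem.List.pyGet?_eq_some_getElem matriz hf (by omega)] at hrow
    exact absurd hrow (by simp)
  case case3 fila columna h1 row hrow h2 ih =>
    intro hf hc
    simp only [PySem.List.len_eq] at h1 h2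
    rw [ih (by omega) (by omega)]
    have hfl : fila.toNat < matriz.length := by omega
    have hrow' : row = matriz[fila.toNat] := by
      rw [PySem.List.pyGet?_eq_some_getElem matriz hf (by omega)] at hrow
      exact (Option.some.inj hrow).symm
    rw [hrow'] at h2
    have hdc : (matriz[fila.toNat] : List String).length ≤ columna.toNat := by
      omega
    have hf1 : (fila + 1).toNat = fila.toNat + 1 := by omega
    unfold elems
    rw [hf1, headD_drop matriz hfl, List.drop_eq_nil_of_le hdc,
      Int.toNat_zero, List.drop_zero, List.nil_append, flatten_drop_headD]
  case case4 fila columna h1 row hrow h2 hact =>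
    intro hf hc
    simp only [PySem.List.len_eq] at h1 h2
    have hrow' : row = matriz[fila.toNat] := by
      rw [PySem.List.pyGet?_eq_some_getElem matriz hf (by omega)] at hrow
      exact (Option.some.inj hrow).symm
    rw [hrow'] at h2
    rw [hrow'] at hact
    rw [PySem.List.pyGet?_eq_some_getElem matriz[fila.toNat] hc (by omega)] at hact
    exact absurd hact (by simp)
  case case5 fila columna h1 row hrow h2 act hact sig h3 ih =>
    intro hf hc
    simp only [PySem.List.len_eq] at h1 h2
    have hrow' : row = matriz[fila.toNat] := by
      rw [PySem.List.pyGet?_eq_some_getElem matriz hf (by omega)] at hrow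
      exact (Option.some.inj hrow).symm
    rw [hrow'] at h2
    have hcl : columna.toNat < matriz[fila.toNat].length := by omega
    have hact' : act = matriz[fila.toNat][columna.toNat] := by
      rw [hrow'] at hact
      rw [PySem.List.pyGet?_eq_some_getElem matriz[fila.toNat] hc (by omega)] at hact
      exact (Option.some.inj hact).symm
    rw [elems_cons matriz fila.toNat columna.toNat (by omega) hcl]
    have hsig : sig = pickR (elems matriz fila.toNat (columna + 1).toNat) := ih hf (by omega)
    have hc1 : (columna + 1).toNat = columna.toNat + 1 := by omega
    have hcons : pickR (matriz[fila.toNat][columna.toNat] :: elems matriz fila.toNat (columna.toNat + 1)) =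
        if PySem.Str.len matriz[fila.toNat][columna.toNat] ≥ PySem.Str.len (pickR (elems matriz fila.toNat (columna.toNat + 1)))
        then matriz[fila.toNat][columna.toNat] else pickR (elems matriz fila.toNat (columna.toNat + 1)) := rfl
    rw [hcons, ← hc1, ← hsig, ← hact', if_pos h3]
  case case6 fila columna h1 row hrow h2 act hact sig h3 ih =>
    intro hf hc
    simp only [PySem.List.len_eq] at h1 h2
    have hrow' : row = matriz[fila.toNat] := by
      rw [PySem.List.pyGet?_eq_some_getElem matriz hf (by omega)] at hrow
      exact (Option.some.inj hrow).symm
    rw [hrow'] at h2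
    have hcl : columna.toNat < matriz[fila.toNat].length := by omega
    have hact' : act = matriz[fila.toNat][columna.toNat] := by
      rw [hrow'] at hact
      rw [PySem.List.pyGet?_eq_some_getElem matriz[fila.toNat] hc (by omega)] at hact
      exact (Option.some.inj hact).symm
    rw [elems_cons matriz fila.toNat columna.toNat (by omega) hcl]
    have hsig : sig = pickR (elems matriz fila.toNat (columna + 1).toNat) := ih hf (by omega)
    have hc1 : (columna + 1).toNat = columna.toNat + 1 := by omega
    have hcons : pickR (matriz[fila.toNat][columna.toNat] :: elems matriz fila.toNat (columna.toNat + 1)) =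
        if PySem.Str.len matriz[fila.toNat][columna.toNat] ≥ PySem.Str.len (pickR (elems matriz fila.toNat (columna.toNat + 1)))
        then matriz[fila.toNat][columna.toNat] else pickR (elems matriz fila.toNat (columna.toNat + 1)) := rfl
    rw [hcons, ← hc1, ← hsig, ← hact', if_neg h3]

-- B computes the foldl with stepL over the same element list.
lemma b_rows (rows : List (List String)) : ∀ (b : String),
    (rows.foldl (fun (st : String × Int) row =>
      ((PySem.List.slice row (some st.2) none).foldl
        (fun best elem => if PySem.Str.len elem > PySem.Str.len best then elem else best) st.1, 0))
      (b, (0 : Int))).1 = rows.flatten.foldl stepL b := by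
  induction rows with
  | nil => intro b; rfl
  | cons r rest ih =>
    intro b
    rw [List.foldl_cons]
    simp only [PySem.List.slice_zero_start, PySem.List.slice_none_none]
    rw [ih, List.flatten_cons, List.foldl_append]
    rfl

lemma b_eq_foldl (matriz : List (List String)) (fila columna : Int)
    (hf : 0 ≤ fila) (hc : 0 ≤ columna) :
    cadena_mas_larga_alt matriz fila columna = (elems matriz fila.toNat columna.toNat).foldl stepL "" := by
  unfold cadena_mas_larga_alt
  rw [PySem.List.slice_from matriz hf]
  have hd : matriz.drop (fila.toNat + 1) = (matriz.drop fila.toNat).tail := by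
    exact (List.tail_drop).symm
  cases h : matriz.drop fila.toNat with
  | nil =>
    unfold elems
    rw [hd, h]
    simp
  | cons r rest =>
    rw [List.foldl_cons]
    simp only [PySem.List.slice_from _ hc]
    rw [b_rows]
    unfold elems
    rw [hd, h, List.foldl_append]
    simp only [List.headD_cons, List.tail_cons]
    rfl

-- ===== VERDICT (by name: the statement is the Claim_ definition above) =====
theorem cadena_mas_larga_spec : Claim_equal_cadena_mas_larga := by
  intro matriz fila columna _hdom hpre
  obtain ⟨hf, hc⟩ := hpre
  unfold Spec_cadena_mas_larga
  rw [a_eq_pickR matriz fila columna hf hc, b_eq_foldl matriz fila columna hf hc, foldl_eq_pickR]
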